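-- pv_equiv track=rewrite | github.com/nanashi-new/darts | app/domain/points.py | points_for_place
-- ===== SOURCE A (Python) =====
-- from typing import Mapping
--
-- PLACE_POINTS: Mapping[range, int] = {
--     range(1, 2): 14,
--     range(2, 3): 12,
--     range(3, 5): 10,
--     range(5, 9): 8,
--     range(9, 17): 6,
--     range(17, 33): 4,
--     range(33, 65): 2,
-- }
--
-- def points_for_place(place: int | None) -> int:
--     """Return rating points for a tournament place."""
--     if place is None:
--         return 0
--     if not isinstance(place, int):
--         raise TypeError("Place must be an integer or None.")
--     if place <= 0:
--         raise ValueError("Place must be a positive integer.")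
--     if place > 64:
--         return 0
--     for place_range, points in PLACE_POINTS.items():
--         if place in place_range:
--             return points
--     return 0
-- ===== SOURCE B (Python) =====
-- def points_for_place(place):
--     """Return rating points for a tournament place."""
--     if place is None:
--         return 0
--     if not isinstance(place, int):
--         raise TypeError("Place must be an integer or None.")
--     if place <= 0:
--         raise ValueError("Place must be a positive integer.")
--     if place > 64:
--         return 0
--     if place == 1:
--         return 14
--     return 12 - 2 * ((place - 1).bit_length() - 1)
-- ===== Notes on version B (the rewrite author's own statement) =====
-- stated objective: simpler
-- what changed: Replaced the scan over the PLACE_POINTS bracket table with a closed-form formula 12 - 2*((place-1).bit_length()-1) (brackets double in width, points drop by 2), keeping all guard clauses.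
import Mathlib
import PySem

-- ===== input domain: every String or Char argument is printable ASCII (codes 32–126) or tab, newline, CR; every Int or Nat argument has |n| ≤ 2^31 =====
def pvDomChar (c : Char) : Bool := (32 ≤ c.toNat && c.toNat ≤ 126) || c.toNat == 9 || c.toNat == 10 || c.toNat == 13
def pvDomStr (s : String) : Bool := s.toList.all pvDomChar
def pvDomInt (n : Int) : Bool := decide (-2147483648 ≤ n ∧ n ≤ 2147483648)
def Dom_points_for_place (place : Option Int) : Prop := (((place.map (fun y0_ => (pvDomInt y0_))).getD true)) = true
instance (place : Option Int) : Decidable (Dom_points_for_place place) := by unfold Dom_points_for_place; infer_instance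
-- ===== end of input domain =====

-- B replaces A's scan of the bracket table with a closed-form bit_length formula; objective: simpler.

-- ===== PORT A =====
-- PLACE_POINTS as an association list of ((lo, hi), points), ranges half-open as in Python.
def placePointsA : List ((Int × Int) × Int) :=
  [((1, 2), 14), ((2, 3), 12), ((3, 5), 10), ((5, 9), 8), ((9, 17), 6), ((17, 33), 4), ((33, 65), 2)]

-- the 'for place_range, points in PLACE_POINTS.items(): if place in place_range: return points' loop
def scanPointsA : List ((Int × Int) × Int) → Int → Int
  | [], _ => 0
  | ((lo, hi), pts) :: rest, p => if lo ≤ p ∧ p < hi then pts else scanPointsA rest p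

def points_for_place (place : Option Int) : Int :=
  match place with
  | none => 0
  | some p =>
    -- 'place <= 0' raises ValueError in Python: excluded by Pre_; value here is irrelevant
    if p ≤ 0 then 0
    else if p > 64 then 0
    else scanPointsA placePointsA p

-- ===== PORT B =====
-- Python's int.bit_length for nonnegative n
def bitLengthB (n : Nat) : Nat := if n = 0 then 0 else Nat.log2 n + 1

def points_for_place_alt (place : Option Int) : Int :=
  match place with
  | none => 0
  | some p =>
    if p ≤ 0 then 0  -- Python raises ValueError here: excluded by Pre_
    else if p > 64 then 0
    else if p = 1 then 14
    else 12 - 2 * ((bitLengthB (p - 1).toNat : Int) - 1)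

-- ===== PRECONDITION & SPEC =====
-- Pre_ excludes exactly the inputs where A raises: some p with p ≤ 0 (ValueError).
def Pre_points_for_place (place : Option Int) : Prop :=
  ∀ p, place = some p → 0 < p
instance (place : Option Int) : Decidable (Pre_points_for_place place) := by
  unfold Pre_points_for_place; infer_instance

def pvWitness_points_for_place : Option Int := some 5

def Spec_points_for_place (place : Option Int) (out : Int) : Prop := out = points_for_place_alt place
instance (place : Option Int) (out : Int) : Decidable (Spec_points_for_place place out) := by unfold Spec_points_for_place; infer_instance

-- ===== CLAIM (what is proved, stated in full; the proofs are below) =====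
def Claim_equal_points_for_place : Prop := ∀ (place : Option Int), Dom_points_for_place place → Pre_points_for_place place → Spec_points_for_place place (points_for_place place)

-- ===== LEMMAS AND PROOFS =====
theorem points_agree_small (p : Int) (h1 : 1 ≤ p) (h64 : p ≤ 64) :
    points_for_place (some p) = points_for_place_alt (some p) := by
  interval_cases p <;> decide

-- ===== VERDICT (by name: the statement is the Claim_ definition above) =====
theorem points_for_place_spec : Claim_equal_points_for_place := by
  intro place _ hpre
  unfold Spec_points_for_place
  match place with
  | none => rfl
  | some p =>
    have hp : 0 < p := hpre p rfl
    by_cases h64 : p ≤ 64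
    · exact points_agree_small p hp h64
    · simp [points_for_place, points_for_place_alt, not_le.mp h64]
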